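-- pv_equiv track=rewrite | github.com/CloudWhiteTower/Format-conversion-tool-for-DNNGP | SNP/hapmap_to_vcf.py | parse_alleles_field
-- ===== SOURCE A (Python) =====
-- def parse_alleles_field(alleles_raw: str) -> list:
--     """Parse HapMap alleles field into an ordered list of unique bases.
--
--     Accepts formats like "A/C", "AC", "A C", or "A|C". Returns only A,C,G,T.
--     The first base is treated as REF, the rest as ALT(s).
--     """
--     if not alleles_raw:
--         return []
--     tokens = []
--     for ch in alleles_raw.replace('/', ' ').replace('|', ' ').replace(',', ' ').split():
--         for c in ch:
--             tokens.append(c.upper())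
--
--     ordered = []
--     for b in tokens:
--         if b in {"A", "C", "G", "T"} and b not in ordered:
--             ordered.append(b)
--     return ordered
-- ===== SOURCE B (Python) =====
-- def parse_alleles_field(alleles_raw: str) -> list:
--     """Per-base scan: the four bases present in the uppercased input,
--     ordered by the index of their first occurrence (REF first)."""
--     s = alleles_raw.upper()
--     present = [b for b in "ACGT" if b in s]
--     present.sort(key=s.find)
--     return present
-- ===== Notes on version B (the rewrite author's own statement) =====
-- stated objective: faster
-- what changed: Replaces A's tokenize/uppercase/dedup per-character Python loop over the whole string with a per-base algorithm: membership-test each of the four bases A,C,G,T in the uppercased input (C-level 'in'/str.find) and sort the present ones by first-occurrence index, which is exactly A's first-occurrence order.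
import Mathlib
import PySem

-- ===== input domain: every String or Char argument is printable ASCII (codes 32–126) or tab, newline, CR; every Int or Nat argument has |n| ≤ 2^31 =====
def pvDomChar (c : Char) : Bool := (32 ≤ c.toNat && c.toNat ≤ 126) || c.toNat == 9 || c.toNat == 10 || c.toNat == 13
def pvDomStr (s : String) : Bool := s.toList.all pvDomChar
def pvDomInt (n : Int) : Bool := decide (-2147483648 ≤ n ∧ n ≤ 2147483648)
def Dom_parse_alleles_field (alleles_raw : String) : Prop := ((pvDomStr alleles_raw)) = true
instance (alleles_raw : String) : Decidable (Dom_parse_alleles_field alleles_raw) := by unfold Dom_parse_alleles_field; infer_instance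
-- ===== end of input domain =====

-- B replaces A's tokenize-then-dedup per-character loop with a per-base algorithm: test each of
-- the four bases for presence in the uppercased input and sort the present ones by
-- first-occurrence index (measured faster in a timing run: C-level scans, no Python loop).

-- ===== PORT A =====
def parse_alleles_field (alleles_raw : String) : List String :=
  if alleles_raw == "" then []
  else
    let words := PySem.Str.split₀
      (PySem.Str.replace (PySem.Str.replace (PySem.Str.replace alleles_raw "/" " ") "|" " ") "," " ")
    let tokens := words.foldl (fun acc ch =>
      ch.toList.foldl (fun acc c => acc ++ [PySem.Str.upper (String.ofList [c])]) acc) []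
    tokens.foldl (fun ordered b =>
      if b ∈ (["A", "C", "G", "T"] : List String) ∧ b ∉ ordered then ordered ++ [b] else ordered) []

-- ===== PORT B =====
def parse_alleles_field_alt (alleles_raw : String) : List String :=
  PySem.List.sorted
    ((["A", "C", "G", "T"] : List String).filter
      (fun b => PySem.Str.isIn b (PySem.Str.upper alleles_raw)))
    (fun b => PySem.Str.find (PySem.Str.upper alleles_raw) b)

-- ===== PRECONDITION & SPEC =====
def Spec_parse_alleles_field (alleles_raw : String) (out : List String) : Prop := out = parse_alleles_field_alt alleles_raw
instance (alleles_raw : String) (out : List String) : Decidable (Spec_parse_alleles_field alleles_raw out) := by unfold Spec_parse_alleles_field; infer_instance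

-- ===== CLAIM (what is proved, stated in full; the proofs are below) =====
def Claim_equal_parse_alleles_field : Prop := ∀ (alleles_raw : String), Dom_parse_alleles_field alleles_raw → Spec_parse_alleles_field alleles_raw (parse_alleles_field alleles_raw)

-- ===== LEMMAS AND PROOFS =====

-- ---- A-side reduction: A equals "ordered dedup of the uppercased characters, filtered to A/C/G/T" ----

theorem replace_go_single (o n : Char) (l : List Char) (acc : List Char) (fuel : Nat)
    (h : l.length ≤ fuel) :
    PySem.Chars.replace.go [o] [n] fuel l acc
      = acc.reverse ++ l.map (fun c => if c = o then n else c) := by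
  induction l generalizing acc fuel with
  | nil => cases fuel <;> simp [PySem.Chars.replace.go]
  | cons c t ih =>
    cases fuel with
    | zero => simp at h
    | succ f =>
      have ht : t.length ≤ f := by simpa using h
      rw [PySem.Chars.replace.go]
      by_cases hc : c = o
      · simp [List.isPrefixOf, hc, ih _ _ ht]
      · simp [List.isPrefixOf, hc, ih _ _ ht]
        intro h; exact absurd h.symm hc

theorem replace_single (l : List Char) (o n : Char) :
    PySem.Chars.replace l [o] [n] = l.map (fun c => if c = o then n else c) := by
  rw [PySem.Chars.replace]
  simp [replace_go_single o n l [] l.length le_rfl]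

theorem split₀_go_flatten (l cur : List Char) (acc : List (List Char)) :
    (PySem.Chars.split₀.go l cur acc).flatten
      = acc.reverse.flatten ++ cur.reverse ++ l.filter (fun c => !PySem.Chars.isspace c) := by
  induction l generalizing cur acc with
  | nil =>
    rw [PySem.Chars.split₀.go]
    by_cases hc : cur.isEmpty
    · simp_all [List.isEmpty_iff]
    · simp [hc]
  | cons c t ih =>
    rw [PySem.Chars.split₀.go]
    by_cases hs : PySem.Chars.isspace c
    · by_cases hc : cur.isEmpty
      · simp_all [List.isEmpty_iff]
      · simp [hs, hc, ih]
    · simp [hs, ih]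

theorem split₀_flatten (l : List Char) :
    (PySem.Chars.split₀ l).flatten = l.filter (fun c => !PySem.Chars.isspace c) := by
  rw [PySem.Chars.split₀]; simp [split₀_go_flatten]

theorem filter_foldl_add (p : String → Bool) (l : List String) (s : List String) :
    ((l.foldl PySem.Set.add s).filter p) = (l.filter p).foldl PySem.Set.add (s.filter p) := by
  induction l generalizing s with
  | nil => simp
  | cons x t ih =>
    by_cases hp : p x
    · by_cases hm : x ∈ s
      · simp [hp, ih, PySem.Set.add, hm, List.mem_filter]
      · simp [hp, ih, PySem.Set.add, hm, List.mem_filter,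
          List.filter_append]
    · by_cases hm : x ∈ s
      · simp [hp, ih, PySem.Set.add, hm]
      · simp [hp, ih, PySem.Set.add, hm,
          List.filter_append]

def qc (c : Char) : Bool := decide (PySem.Chars.upperChar c ∈ (['A', 'C', 'G', 'T'] : List Char))

theorem oneChar_mem (c : Char) :
    String.ofList [c] ∈ (["A", "C", "G", "T"] : List String)
      ↔ c ∈ (['A', 'C', 'G', 'T'] : List Char) := by
  have h : ∀ d : Char, (String.ofList [c] = String.ofList [d]) ↔ c = d := by
    intro d
    constructor
    · intro h; have := congrArg String.toList h; simpa using this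
    · intro h; rw [h]
  simp only [List.mem_cons, List.not_mem_nil, or_false]
  show (String.ofList [c] = String.ofList ['A'] ∨ String.ofList [c] = String.ofList ['C'] ∨
      String.ofList [c] = String.ofList ['G'] ∨ String.ofList [c] = String.ofList ['T']) ↔ _
  simp [h]

theorem qc_not_space (c : Char) (h : qc c = true) : PySem.Chars.isspace c = false := by
  unfold qc PySem.Chars.upperChar at h
  by_cases hl : PySem.Chars.islower c = true
  · have hb : 97 ≤ c.toNat ∧ c.toNat ≤ 122 := by
      unfold PySem.Chars.islower at hl
      rw [Bool.and_eq_true, decide_eq_true_iff, decide_eq_true_iff, Char.le_def, Char.le_def,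
        UInt32.le_iff_toNat_le, UInt32.le_iff_toNat_le] at hl
      exact hl
    simp [PySem.Chars.isspace]
    omega
  · simp [hl] at h
    rcases h with h | h | h | h <;> subst h <;> decide

theorem filter_qc_filter_ns (l : List Char) :
    (l.filter (fun c => !PySem.Chars.isspace c)).filter qc = l.filter qc := by
  induction l with
  | nil => rfl
  | cons c t ih =>
    by_cases hs : PySem.Chars.isspace c
    · have hq : qc c = false := by
        cases hqc : qc c
        · rfl
        · rw [qc_not_space c hqc] at hs; exact absurd hs (by simp)
      simp [hs, hq, ih]
    · simp [List.filter_cons, hs, ih]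

theorem filter_qc_map_sub (o : Char) (ho : qc o = false) (l : List Char) :
    (l.map (fun c => if c = o then ' ' else c)).filter qc = l.filter qc := by
  induction l with
  | nil => rfl
  | cons c t ih =>
    by_cases hc : c = o
    · subst hc
      have : qc ' ' = false := by decide
      simp [this, ho, ih]
    · simp [List.filter_cons, hc, ih]

theorem A_eq_form (s : String) :
    parse_alleles_field s
      = (PySem.List.dedup ((PySem.Str.upper s).toList.map (fun c => String.ofList [c]))).filter
          (fun b => b ∈ (["A", "C", "G", "T"] : List String)) := by
  unfold parse_alleles_field
  by_cases hs : s = ""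
  · subst hs; decide
  · have hbeq : (s == "") = false := by simpa using hs
    rw [hbeq]
    simp only [Bool.false_eq_true, if_false]
    have hstep : (fun (ordered : List String) (b : String) =>
        if b ∈ (["A", "C", "G", "T"] : List String) ∧ b ∉ ordered then ordered ++ [b] else ordered)
        = (fun (ordered : List String) (b : String) =>
            if (decide (b ∈ (["A", "C", "G", "T"] : List String))) = true
            then PySem.Set.add ordered b else ordered) := by
      funext ordered b
      by_cases hb : b ∈ (["A", "C", "G", "T"] : List String)
      · by_cases hm : b ∈ ordered <;>
          simp [hb, hm, PySem.Set.add]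
      · simp [hb]
    rw [hstep, ← List.foldl_filter]
    rw [PySem.List.dedup_eq_ofList, PySem.Set.ofList_eq_foldl,
      filter_foldl_add _ _ [], List.filter_nil]
    refine congrArg (List.foldl PySem.Set.add []) ?_
    have hinner : (fun (acc : List String) (ch : String) =>
        ch.toList.foldl (fun acc c => acc ++ [PySem.Str.upper (String.ofList [c])]) acc)
        = (fun acc ch => acc ++ ch.toList.map (fun c => PySem.Str.upper (String.ofList [c]))) := by
      funext acc ch
      exact PySem.List.foldl_append_singleton_eq_map _ ch.toList acc
    rw [hinner, PySem.List.foldl_append_eq_flatMap, List.nil_append]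
    rw [← List.map_flatMap]
    have hflat : ∀ (ws : List String), ws.flatMap String.toList = (ws.map String.toList).flatten := by
      intro ws; simp [List.flatMap_def]
    rw [hflat, PySem.Str.split₀_map_toList, split₀_flatten]
    simp only [PySem.Str.toList_replace]
    have h1 : ("/" : String).toList = ['/'] := by decide
    have h2 : ("|" : String).toList = ['|'] := by decide
    have h3 : ("," : String).toList = [','] := by decide
    have h4 : (" " : String).toList = [' '] := by decide
    rw [h1, h2, h3, h4, replace_single, replace_single, replace_single]
    have hf : (fun c => PySem.Str.upper (String.ofList [c]))
        = (fun c => String.ofList [PySem.Chars.upperChar c]) := by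
      funext c; simp [PySem.Str.upper, PySem.Chars.upper]
    rw [hf]
    have hupper : (PySem.Str.upper s).toList = s.toList.map PySem.Chars.upperChar := by
      simp [PySem.Str.toList_upper, PySem.Chars.upper]
    conv_rhs => rw [hupper, List.map_map]
    conv_lhs => rw [List.filter_map]
    conv_rhs => rw [List.filter_map]
    have hcomp : ((fun b => decide (b ∈ (["A", "C", "G", "T"] : List String))) ∘
        (fun c => String.ofList [PySem.Chars.upperChar c])) = qc := by
      funext c
      exact decide_eq_decide.mpr (oneChar_mem _)
    have hcomp2 : ((fun b => decide (b ∈ (["A", "C", "G", "T"] : List String))) ∘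
        ((fun c : Char => String.ofList [c]) ∘ PySem.Chars.upperChar)) = qc := by
      funext c
      exact decide_eq_decide.mpr (oneChar_mem _)
    rw [hcomp, hcomp2]
    have hg : ((fun c : Char => String.ofList [c]) ∘ PySem.Chars.upperChar)
        = (fun c => String.ofList [PySem.Chars.upperChar c]) := rfl
    rw [hg]
    refine congrArg (List.map _) ?_
    rw [filter_qc_filter_ns,
      filter_qc_map_sub ',' (by decide), filter_qc_map_sub '|' (by decide),
      filter_qc_map_sub '/' (by decide)]

-- ---- B-side facts ----

theorem single_inj {a b : Char} (h : String.ofList [a] = String.ofList [b]) : a = b := by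
  have := congrArg String.toList h; simpa using this

theorem singleton_prefix_drop (u : List Char) (c : Char) (i : Nat) (hi : i < u.length) :
    ([c] <+: u.drop i) ↔ u[i] = c := by
  rw [List.drop_eq_getElem_cons hi, List.cons_prefix_cons]
  simp [eq_comm]

theorem idx_min (u : List Char) (c : Char) (i : Nat) (h : i < u.idxOf c) (hl : i < u.length) :
    u[i] ≠ c := by
  have := List.not_of_lt_findIdx (p := (· == c)) (xs := u) (by simpa [List.idxOf] using h)
  simpa using this

theorem find_singleton (u : List Char) (c : Char) (h : c ∈ u) :
    PySem.Chars.find u [c] = (u.idxOf c : Int) := by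
  have hinf : [c] <:+: u := (List.singleton_infix_iff c u).mpr h
  have hnn : 0 ≤ PySem.Chars.find u [c] := (PySem.Chars.find_nonneg_iff u [c]).mpr hinf
  obtain ⟨hpre, hmin⟩ := PySem.Chars.find_spec hnn
  have hkl : u.idxOf c < u.length := List.idxOf_lt_length_iff.mpr h
  have hpk : [c] <+: u.drop (u.idxOf c) :=
    (singleton_prefix_drop u c _ hkl).mpr (List.getElem_idxOf hkl)
  have h1 : ¬ (PySem.Chars.find u [c]).toNat < u.idxOf c := by
    intro hlt
    have hlen : (PySem.Chars.find u [c]).toNat < u.length := lt_trans hlt hkl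
    exact idx_min u c _ hlt hlen ((singleton_prefix_drop u c _ hlen).mp hpre)
  have h2 : ¬ u.idxOf c < (PySem.Chars.find u [c]).toNat := fun hlt => hmin _ hlt hpk
  omega

theorem dedup_pairwise_idxOf (xs : List Char) :
    (PySem.List.dedup xs).Pairwise (fun a b => xs.idxOf a < xs.idxOf b) := by
  induction xs with
  | nil => simp [PySem.List.dedup_eq_ofList, PySem.Set.ofList_nil]
  | cons x t ih =>
    rw [PySem.List.dedup_eq_ofList, PySem.Set.ofList_cons]
    rw [PySem.List.dedup_eq_ofList] at ih
    refine List.Pairwise.cons ?_ ?_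
    · intro b hb
      obtain ⟨-, hbx⟩ := (PySem.Set.mem_discard _ _ _).mp hb
      rw [List.idxOf_cons_self, List.idxOf_cons_ne t (fun he => hbx he.symm)]
      exact Nat.succ_pos _
    · have hsub : List.Sublist (PySem.Set.discard (PySem.Set.ofList t) x) (PySem.Set.ofList t) :=
        List.filter_sublist
      have hp := List.Pairwise.sublist hsub ih
      refine hp.imp_of_mem ?_
      intro a b ha hb hab
      obtain ⟨-, hax⟩ := (PySem.Set.mem_discard _ _ _).mp ha
      obtain ⟨-, hbx⟩ := (PySem.Set.mem_discard _ _ _).mp hb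
      rw [List.idxOf_cons_ne t (fun he => hax he.symm),
        List.idxOf_cons_ne t (fun he => hbx he.symm)]
      exact Nat.succ_lt_succ hab

theorem dedup_map_single (u : List Char) :
    PySem.List.dedup (u.map (fun c => String.ofList [c]))
      = (PySem.List.dedup u).map (fun c => String.ofList [c]) := by
  simp only [PySem.List.dedup_eq_ofList]
  induction u with
  | nil => simp [PySem.Set.ofList_nil]
  | cons c t ih =>
    rw [List.map_cons, PySem.Set.ofList_cons, PySem.Set.ofList_cons, ih, List.map_cons]
    refine congrArg (_ :: ·) ?_
    show (List.map _ _).filter _ = _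
    rw [List.filter_map]
    refine congrArg (List.map _) ?_
    refine congrArg (fun p => List.filter p _) ?_
    funext a
    simp only [Function.comp]
    by_cases h : a = c
    · subst h; simp
    · have : ¬ (String.ofList [a] = String.ofList [c]) := fun he => h (single_inj he)
      simp [h, this]

theorem isIn_single (c : Char) (s : String) :
    PySem.Str.isIn (String.ofList [c]) s = true ↔ c ∈ s.toList := by
  rw [PySem.Str.isIn_iff_infix]
  have : (String.ofList [c]).toList = [c] := by simp
  rw [this, List.singleton_infix_iff]

theorem alt_eq_form (s : String) :
    parse_alleles_field_alt s
      = (PySem.List.dedup ((PySem.Str.upper s).toList.map (fun c => String.ofList [c]))).filter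
          (fun b => b ∈ (["A", "C", "G", "T"] : List String)) := by
  unfold parse_alleles_field_alt
  set u := (PySem.Str.upper s).toList with hu
  -- rewrite the RHS through the char level
  have hform : (PySem.List.dedup (u.map (fun c => String.ofList [c]))).filter
        (fun b => b ∈ (["A", "C", "G", "T"] : List String))
      = ((PySem.List.dedup u).filter (fun c => decide (c ∈ (['A','C','G','T'] : List Char)))).map
          (fun c => String.ofList [c]) := by
    rw [dedup_map_single, List.filter_map]
    refine congrArg (List.map _) ?_
    refine congrArg (fun p => List.filter p _) ?_
    funext c
    simp only [Function.comp]
    exact decide_eq_decide.mpr (oneChar_mem c)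
  have hK : (["A", "C", "G", "T"] : List String)
      = (['A','C','G','T'] : List Char).map (fun c => String.ofList [c]) := by decide
  rw [hform, hK, List.filter_map]
  apply PySem.List.sorted_eq_of_perm_of_pairwise_lt
  · -- Perm
    refine List.Perm.map _ ?_
    simp only [Function.comp_def]
    have hn1 : ((PySem.List.dedup u).filter
        (fun c => decide (c ∈ (['A','C','G','T'] : List Char)))).Nodup :=
      (PySem.List.nodup_dedup u).filter _
    have hn2 : ((['A','C','G','T'] : List Char).filter
        (fun c => PySem.Str.isIn (String.ofList [c]) (PySem.Str.upper s))).Nodup :=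
      (by decide : (['A','C','G','T'] : List Char).Nodup).filter _
    rw [List.perm_ext_iff_of_nodup hn1 hn2]
    intro a
    simp only [List.mem_filter, PySem.List.mem_dedup, decide_eq_true_iff]
    rw [isIn_single a (PySem.Str.upper s), ← hu]
    exact ⟨fun ⟨h1, h2⟩ => ⟨h2, h1⟩, fun ⟨h1, h2⟩ => ⟨h2, h1⟩⟩
  · -- Pairwise strictly increasing keys
    rw [List.pairwise_map]
    have hp := List.Pairwise.sublist
      (List.filter_sublist (p := fun c => decide (c ∈ (['A','C','G','T'] : List Char)))
        (l := PySem.List.dedup u)) (dedup_pairwise_idxOf u)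
    refine hp.imp_of_mem ?_
    intro a b ha hb hab
    have hau : a ∈ u := (PySem.List.mem_dedup _ _).mp (List.mem_of_mem_filter ha)
    have hbu : b ∈ u := (PySem.List.mem_dedup _ _).mp (List.mem_of_mem_filter hb)
    have hea : (String.ofList [a]).toList = [a] := by simp
    have heb : (String.ofList [b]).toList = [b] := by simp
    show PySem.Str.find (PySem.Str.upper s) (String.ofList [a])
        < PySem.Str.find (PySem.Str.upper s) (String.ofList [b])
    rw [PySem.Str.find_eq, PySem.Str.find_eq, hea, heb, ← hu,
      find_singleton u a hau, find_singleton u b hbu]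
    exact_mod_cast hab

-- ===== VERDICT (by name: the statement is the Claim_ definition above) =====
theorem parse_alleles_field_spec : Claim_equal_parse_alleles_field := by
  intro s _
  show parse_alleles_field s = parse_alleles_field_alt s
  rw [A_eq_form, alt_eq_form]
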